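-- pv_equiv track=rewrite | github.com/TechHares/leek | leek/f/ops.py | _calculate
-- ===== SOURCE A (Python) =====
-- def _calculate(lst):
--     v = lst[0]
--     idx = 0
--     for i in range(len(lst)):
--         if lst[i] <= v:
--             v = lst[i]
--             idx = i
--     return idx
-- ===== SOURCE B (Python) =====
-- def _calculate(lst):
--     m = min(lst)
--     return len(lst) - 1 - lst[::-1].index(m)
-- ===== Notes on version B (the rewrite author's own statement) =====
-- stated objective: idiomatic
-- what changed: Replaced the running-minimum index-tracking loop with a two-pass decomposition (min builtin, then last occurrence via lst[::-1].index); Pre_ excludes only the empty list, on which A raises IndexError (B raises ValueError from min([])).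
import Mathlib
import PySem

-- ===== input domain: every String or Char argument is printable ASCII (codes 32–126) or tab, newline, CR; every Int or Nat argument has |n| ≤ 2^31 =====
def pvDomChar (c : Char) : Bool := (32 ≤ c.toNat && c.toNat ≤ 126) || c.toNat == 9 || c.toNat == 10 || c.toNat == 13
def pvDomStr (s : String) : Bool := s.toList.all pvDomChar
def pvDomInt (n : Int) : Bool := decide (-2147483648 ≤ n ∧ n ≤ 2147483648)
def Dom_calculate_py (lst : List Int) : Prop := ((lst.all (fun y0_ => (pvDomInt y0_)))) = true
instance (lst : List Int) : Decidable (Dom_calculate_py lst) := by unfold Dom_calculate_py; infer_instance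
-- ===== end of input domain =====

-- B replaces A's running-minimum index-tracking loop with a two-pass decomposition
-- (compute min, then find the last occurrence by searching the reversed list); same O(n) cost.


-- ===== PORT A =====
def calculate_py (lst : List Int) : Int :=
  match PySem.List.pyGet? lst 0 with     -- v = lst[0]  (none = IndexError, outside Pre_)
  | none => 0
  | some v0 =>
    ((PySem.List.pyRange 0 lst.length 1).foldl
      (fun (st : Int × Int) i =>
        if PySem.List.pyGetD lst i 0 ≤ st.1 then (PySem.List.pyGetD lst i 0, i) else st)
      (v0, 0)).2

-- ===== PORT B =====
def calculate_py_alt (lst : List Int) : Int :=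
  let m := (PySem.List.min? lst (fun x => x)).getD 0       -- m = min(lst)  (none = ValueError, outside Pre_)
  let r := (PySem.List.slice? lst none none (-1)).getD []  -- lst[::-1]
  (lst.length : Int) - 1 - ((PySem.List.index? r m).getD 0 : Nat)

-- ===== PRECONDITION & SPEC =====
-- Pre_ excludes only the empty list, on which A raises IndexError at lst[0] (B raises ValueError at min([])).
def Pre_calculate_py (lst : List Int) : Prop := lst ≠ []
instance (lst : List Int) : Decidable (Pre_calculate_py lst) := by unfold Pre_calculate_py; infer_instance
def pvWitness_calculate_py : List Int := [3, 1, 2, 1]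
def Spec_calculate_py (lst : List Int) (out : Int) : Prop := out = calculate_py_alt lst
instance (lst : List Int) (out : Int) : Decidable (Spec_calculate_py lst out) := by unfold Spec_calculate_py; infer_instance

-- ===== CLAIM (what is proved, stated in full; the proofs are below) =====
def Claim_equal_calculate_py : Prop := ∀ (lst : List Int), Dom_calculate_py lst → Pre_calculate_py lst → Spec_calculate_py lst (calculate_py lst)

-- ===== LEMMAS AND PROOFS =====

-- A's loop, rephrased over enumerate, computes (min, last argmin) — the pair B computes.
theorem calc_loop_char (t : List Int) (a : Int) :
    (PySem.List.enumerate (a :: t) 0).foldl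
      (fun (st : Int × Int) p => if p.2 ≤ st.1 then (p.2, p.1) else st) (a, 0)
    = (t.foldl min a,
       ((a :: t).length : Int) - 1 -
         ((PySem.List.index? (a :: t).reverse (t.foldl min a)).getD 0 : Nat)) := by
  induction t using List.reverseRecOn with
  | nil =>
      simp [PySem.List.enumerate, PySem.List.index?_eq_idxOf?, List.idxOf?]
  | append_singleton s y ih =>
      have hcons : a :: (s ++ [y]) = (a :: s) ++ [y] := by simp
      rw [hcons, PySem.List.enumerate_append, List.foldl_append, ih]
      have hm : (s ++ [y]).foldl min a = min (s.foldl min a) y := by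
        simp [List.foldl_append]
      simp only [PySem.List.enumerate, List.foldl_cons, List.foldl_nil, hm,
        List.reverse_append, List.reverse_cons, List.reverse_nil, List.nil_append,
        List.cons_append]
      by_cases hy : y ≤ s.foldl min a
      · have hmin : min (s.foldl min a) y = y := by omega
        rw [if_pos hy, hmin, PySem.List.index?_cons_self]
        simp [List.length_append]
      · have hmin : min (s.foldl min a) y = s.foldl min a := by omega
        have hne : y ≠ s.foldl min a := by omega
        rw [if_neg hy, hmin, PySem.List.index?_cons_of_ne _ hne]
        have hmem : s.foldl min a ∈ (a :: s).reverse := by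
          rcases PySem.List.foldl_min_mem s a with h | h <;> simp [h]
        rcases (PySem.List.index?_isSome_iff ((a :: s).reverse) (s.foldl min a)).2 hmem
          |> Option.isSome_iff_exists.1 with ⟨k, hk⟩
        simp only [List.reverse_cons] at hk
        rw [hk]
        simp [List.length_append]

-- ===== VERDICT (by name: the statement is the Claim_ definition above) =====
theorem calculate_py_spec : Claim_equal_calculate_py := by
  intro lst _ hpre
  rcases lst with _ | ⟨a, t⟩
  · exact absurd rfl hpre
  unfold Spec_calculate_py calculate_py calculate_py_alt
  rw [PySem.List.pyGet?_zero_cons]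
  simp only [PySem.List.slice?_none_none_neg_one, PySem.List.min?_id_cons, Option.getD_some]
  have henum := PySem.List.enumerate_eq_map_pyRange (a :: t) (0 : Int)
  simp only [PySem.List.len_eq] at henum
  calc ((PySem.List.pyRange 0 (a :: t).length 1).foldl
          (fun (st : Int × Int) i =>
            if PySem.List.pyGetD (a :: t) i 0 ≤ st.1 then (PySem.List.pyGetD (a :: t) i 0, i) else st)
          (a, 0)).2
      = ((PySem.List.enumerate (a :: t) 0).foldl
          (fun (st : Int × Int) p => if p.2 ≤ st.1 then (p.2, p.1) else st) (a, 0)).2 := by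
        rw [henum, List.foldl_map]
    _ = ((a :: t).length : Int) - 1 -
          ((PySem.List.index? (a :: t).reverse (t.foldl min a)).getD 0 : Nat) := by
        rw [calc_loop_char]
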